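-- pv_equiv track=rewrite | github.com/EspressoGelato/NLG-Project | pair-emnlp2020/planning/data/utils.py | fuzzy_match_kp
-- ===== SOURCE A (Python) =====
-- def fuzzy_match_kp(kp, text):
--     """Match kp with text if no exact match was found.
--
--     Args:
--         kp (str):  such as `2.5 B worth`
--         text (str): such as `$2.5B worth of oil`
--
--     We consider shrink spaces between tokens in kp.
--     """
--
--     # 1-space
--     for ch_ix, ch in enumerate(kp):
--         if ch != ' ': continue
--         new_kp = kp[:ch_ix] + kp[ch_ix + 1:]
--         if new_kp in text:
--             return text.index(new_kp)
--
--     for ch_ix, ch in enumerate(kp):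
--         if ch != ' ': continue
--         new_kp = kp[:ch_ix] + kp[ch_ix + 1:]
--         secondary_match = fuzzy_match_kp(new_kp, text)
--         if secondary_match is not None:
--             return secondary_match
--     return None
-- ===== SOURCE B (Python) =====
-- def fuzzy_match_kp(kp, text):
--     """Same result as the naive version; memoized DFS instead of naive
--     recursion: subproblems whose whole subtree yields no match are remembered
--     in a seen-set, so each distinct string is explored at most once."""
--     seen = set()
--
--     def dfs(s):
--         if s in seen:
--             return None
--         seen.add(s)
--         cands = [s[:i] + s[i + 1:] for i, ch in enumerate(s) if ch == ' ']
--         for c in cands: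
--             if c in text:
--                 return text.index(c)
--         for c in cands:
--             r = dfs(c)
--             if r is not None:
--                 return r
--         return None
--
--     return dfs(kp)
-- ===== Notes on version B (the rewrite author's own statement) =====
-- stated objective: alternative
-- what changed: B replaces A's naive recursion, which re-explores the same space-deleted string once per deletion order, with a memoized DFS carrying a seen-set of already-failed strings, so each distinct subproblem is explored at most once.
import Mathlib
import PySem

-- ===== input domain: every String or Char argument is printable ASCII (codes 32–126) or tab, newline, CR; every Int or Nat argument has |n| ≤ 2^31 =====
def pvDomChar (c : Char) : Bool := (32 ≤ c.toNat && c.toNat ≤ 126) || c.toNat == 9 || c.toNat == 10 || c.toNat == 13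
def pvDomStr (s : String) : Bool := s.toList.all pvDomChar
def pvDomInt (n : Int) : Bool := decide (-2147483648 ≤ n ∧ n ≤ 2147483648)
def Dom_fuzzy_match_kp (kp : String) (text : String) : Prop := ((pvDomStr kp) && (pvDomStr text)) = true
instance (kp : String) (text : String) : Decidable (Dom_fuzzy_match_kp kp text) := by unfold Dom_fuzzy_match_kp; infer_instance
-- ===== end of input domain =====

-- B replaces A's naive recursion by a memoized DFS with a seen-set of already-failed
-- strings, visiting each distinct space-deleted string at most once (objective: alternative).
-- Both ports use a structural fuel counter only to make the same recursion total:
-- every recursive call is on a string one character shorter, so the fuel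
-- (initial string length + 1) is never exhausted.

-- ===== PORT A =====
-- kp[:i] + kp[i+1:]  (deletion of the character at index i)
def pvRemAt (s : List Char) (i : Nat) : List Char := s.take i ++ s.drop (i+1)

-- first for-loop of A: direct substring check of each single-space deletion
-- (gas = number of loop iterations left, it starts at s.length)
def fmALoop1 (t : List Char) (s : List Char) : Nat → Nat → Option Int
  | 0, _ => none
  | gas+1, i =>
    if h : i < s.length then
      if s[i] = ' ' then
        if PySem.Chars.isIn (pvRemAt s i) t then some (PySem.Chars.find t (pvRemAt s i))
        else fmALoop1 t s gas (i+1)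
      else fmALoop1 t s gas (i+1)
    else none

-- second for-loop of A: recurse (with one fuel unit less) on each single-space deletion
def fmALoop2 (recur : List Char → Option Int) (t : List Char) (s : List Char) :
    Nat → Nat → Option Int
  | 0, _ => none
  | gas+1, i =>
    if h : i < s.length then
      if s[i] = ' ' then
        match recur (pvRemAt s i) with
        | some r => some r
        | none => fmALoop2 recur t s gas (i+1)
      else fmALoop2 recur t s gas (i+1)
    else none

-- body of A: loop 1, then the recursive loop 2
def fmA : Nat → List Char → List Char → Option Int
  | 0, _, _ => none
  | fuel+1, t, s =>
    match fmALoop1 t s s.length 0 with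
    | some r => some r
    | none => fmALoop2 (fmA fuel t) t s s.length 0

def fuzzy_match_kp (kp : String) (text : String) : Option Int :=
  fmA (kp.toList.length + 1) text.toList kp.toList

-- ===== PORT B =====
-- [s[:i] + s[i+1:] for i, ch in enumerate(s) if ch == ' ']
def pvCands (s : List Char) : List (List Char) :=
  (List.range s.length).filterMap (fun i => if s[i]? = some ' ' then some (pvRemAt s i) else none)

-- first for-loop of B's dfs: direct substring check of each candidate
def fmBDirect (t : List Char) : List (List Char) → Option Int
  | [] => none
  | c :: rest =>
    if PySem.Chars.isIn c t then some (PySem.Chars.find t c) else fmBDirect t rest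

-- second for-loop of B's dfs, threading the seen-set through the recursive calls
def fmBRec (recur : List Char → PySem.Set (List Char) → Option Int × PySem.Set (List Char)) :
    List (List Char) → PySem.Set (List Char) → Option Int × PySem.Set (List Char)
  | [], seen => (none, seen)
  | c :: rest, seen =>
    match recur c seen with
    | (some r, sn) => (some r, sn)
    | (none, sn) => fmBRec recur rest sn

-- B's dfs: skip strings already seen, remember s, direct checks, then recurse
def fmB : Nat → List Char → List Char → PySem.Set (List Char) →
    Option Int × PySem.Set (List Char)
  | 0, _, _, seen => (none, seen)
  | fuel+1, t, s, seen =>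
    if PySem.Set.contains seen s then (none, seen)
    else
      match fmBDirect t (pvCands s) with
      | some r => (some r, PySem.Set.add seen s)
      | none => fmBRec (fmB fuel t) (pvCands s) (PySem.Set.add seen s)

def fuzzy_match_kp_alt (kp : String) (text : String) : Option Int :=
  (fmB (kp.toList.length + 1) text.toList kp.toList PySem.Set.empty).1

-- ===== PRECONDITION & SPEC =====
def Spec_fuzzy_match_kp (kp : String) (text : String) (out : Option Int) : Prop := out = fuzzy_match_kp_alt kp text
instance (kp : String) (text : String) (out : Option Int) : Decidable (Spec_fuzzy_match_kp kp text out) := by unfold Spec_fuzzy_match_kp; infer_instance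

-- ===== CLAIM (what is proved, stated in full; the proofs are below) =====
def Claim_equal_fuzzy_match_kp : Prop := ∀ (kp : String) (text : String), Dom_fuzzy_match_kp kp text → Spec_fuzzy_match_kp kp text (fuzzy_match_kp kp text)

-- ===== LEMMAS AND PROOFS =====

theorem pvRemAt_length {s : List Char} {i : Nat} (h : i < s.length) :
    (pvRemAt s i).length = s.length - 1 := by
  simp [pvRemAt]; omega

theorem pvCands_mem_length {s c : List Char} (h : c ∈ pvCands s) :
    c.length + 1 = s.length := by
  simp only [pvCands, List.mem_filterMap, List.mem_range] at h
  obtain ⟨i, hi, hif⟩ := h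
  split at hif
  · cases hif; rw [pvRemAt_length hi]; omega
  · cases hif

-- candidates of s whose space position is ≥ i
def pvCandsFrom (s : List Char) (i : Nat) : List (List Char) :=
  (List.range' i (s.length - i)).filterMap (fun j => if s[j]? = some ' ' then some (pvRemAt s j) else none)

-- scan a candidate list with A's recursion at a given fuel, returning the first hit
def pvScan (fuel : Nat) (t : List Char) : List (List Char) → Option Int
  | [] => none
  | c :: rest =>
    match fmA fuel t c with
    | some v => some v
    | none => pvScan fuel t rest

theorem pvCandsFrom_zero (s : List Char) : pvCandsFrom s 0 = pvCands s := by
  simp [pvCandsFrom, pvCands, List.range_eq_range']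

theorem pvCandsFrom_ge {s : List Char} {i : Nat} (h : s.length ≤ i) : pvCandsFrom s i = [] := by
  simp [pvCandsFrom, Nat.sub_eq_zero_of_le h]

theorem pvCandsFrom_lt {s : List Char} {i : Nat} (h : i < s.length) :
    pvCandsFrom s i =
      if s[i] = ' ' then pvRemAt s i :: pvCandsFrom s (i+1) else pvCandsFrom s (i+1) := by
  have hk : s.length - i = (s.length - (i+1)) + 1 := by omega
  rw [pvCandsFrom, hk, List.range'_succ, List.filterMap_cons, List.getElem?_eq_getElem h]
  by_cases hsp : s[i] = ' '
  · simp [hsp, pvCandsFrom]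
  · simp [hsp, pvCandsFrom]

theorem fmBDirect_eq (t s : List Char) : ∀ gas i, s.length ≤ i + gas →
    fmBDirect t (pvCandsFrom s i) = fmALoop1 t s gas i := by
  intro gas
  induction gas with
  | zero =>
    intro i hk
    rw [pvCandsFrom_ge (by omega), fmALoop1]
    rfl
  | succ gas IHg =>
    intro i hk
    by_cases h : i < s.length
    · rw [pvCandsFrom_lt h, fmALoop1, dif_pos h]
      by_cases hsp : s[i] = ' '
      · rw [if_pos hsp, if_pos hsp, fmBDirect]
        by_cases hin : PySem.Chars.isIn (pvRemAt s i) t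
        · rw [if_pos hin, if_pos hin]
        · rw [if_neg hin, if_neg hin]
          exact IHg (i+1) (by omega)
      · rw [if_neg hsp, if_neg hsp]
        exact IHg (i+1) (by omega)
    · rw [pvCandsFrom_ge (by omega), fmALoop1, dif_neg h]
      rfl

theorem fmALoop2_eq (fuel : Nat) (t s : List Char) : ∀ gas i, s.length ≤ i + gas →
    pvScan fuel t (pvCandsFrom s i) = fmALoop2 (fmA fuel t) t s gas i := by
  intro gas
  induction gas with
  | zero =>
    intro i hk
    rw [pvCandsFrom_ge (by omega), fmALoop2]
    rfl
  | succ gas IHg =>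
    intro i hk
    by_cases h : i < s.length
    · rw [pvCandsFrom_lt h, fmALoop2, dif_pos h]
      by_cases hsp : s[i] = ' '
      · rw [if_pos hsp, if_pos hsp, pvScan]
        cases hA : fmA fuel t (pvRemAt s i) with
        | some r => rfl
        | none => exact IHg (i+1) (by omega)
      · rw [if_neg hsp, if_neg hsp]
        exact IHg (i+1) (by omega)
    · rw [pvCandsFrom_ge (by omega), fmALoop2, dif_neg h]
      rfl

-- the memoized DFS agrees with the naive recursion: every string in the seen-set
-- is one whose whole naive subtree (at its own natural fuel) found nothing
theorem fmB_sound (t : List Char) : ∀ n (s : List Char) (seen : PySem.Set (List Char)),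
    s.length = n →
    (∀ x ∈ seen, x.length ≤ n → fmA (x.length + 1) t x = none) →
    (fmB (n+1) t s seen).1 = fmA (n+1) t s ∧
    (∀ x ∈ (fmB (n+1) t s seen).2, x ∈ seen ∨ x.length ≤ n) ∧
    ((fmB (n+1) t s seen).1 = none →
      ∀ x ∈ (fmB (n+1) t s seen).2, x.length ≤ n → fmA (x.length + 1) t x = none) := by
  intro n
  induction n using Nat.strong_induction_on with
  | _ n IH =>
  intro s seen hlen hinv
  rw [fmB]
  by_cases hseen : PySem.Set.contains seen s
  · rw [if_pos hseen]
    have hmem : s ∈ seen := by simpa using hseen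
    have hA : fmA (s.length + 1) t s = none := hinv s hmem (by omega)
    rw [hlen] at hA
    exact ⟨hA.symm, fun x hx => Or.inl hx, fun _ x hx hlx => hinv x hx hlx⟩
  · rw [if_neg hseen]
    have hdir : fmBDirect t (pvCands s) = fmALoop1 t s s.length 0 := by
      rw [← pvCandsFrom_zero]; exact fmBDirect_eq t s s.length 0 (by omega)
    cases hd : fmBDirect t (pvCands s) with
    | some r =>
      have hAeq : fmA (n+1) t s = some r := by
        rw [fmA, ← hdir, hd]
      refine ⟨hAeq.symm, fun x hx => ?_, fun hn => by simp at hn⟩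
      rw [PySem.Set.mem_add] at hx
      rcases hx with h | h
      · exact Or.inl h
      · subst h; exact Or.inr (by omega)
    | none =>
      have hAeq : fmA (n+1) t s = fmALoop2 (fmA n t) t s s.length 0 := by
        rw [fmA, ← hdir, hd]
      have hscan : pvScan n t (pvCands s) = fmALoop2 (fmA n t) t s s.length 0 := by
        rw [← pvCandsFrom_zero]; exact fmALoop2_eq n t s s.length 0 (by omega)
      have hrec : ∀ cs, (∀ c ∈ cs, c.length + 1 = n) →
          ∀ sn : PySem.Set (List Char),
          (∀ x ∈ sn, x.length + 1 ≤ n → fmA (x.length + 1) t x = none) →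
          (fmBRec (fmB n t) cs sn).1 = pvScan n t cs ∧
          (∀ x ∈ (fmBRec (fmB n t) cs sn).2, x ∈ sn ∨ x.length + 1 ≤ n) ∧
          ((fmBRec (fmB n t) cs sn).1 = none →
            ∀ x ∈ (fmBRec (fmB n t) cs sn).2, x.length + 1 ≤ n →
              fmA (x.length + 1) t x = none) := by
        intro cs
        induction cs with
        | nil =>
          intro _ sn hin
          exact ⟨rfl, fun x hx => Or.inl hx, fun _ x hx h2 => hin x hx h2⟩
        | cons c rest IHc =>
          intro hlens sn hin
          have hcn : c.length + 1 = n := hlens c (List.mem_cons_self)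
          have hcall := IH c.length (by omega) c sn rfl
            (fun x hx hlx => hin x hx (by omega))
          rw [hcn] at hcall
          rw [fmBRec]
          rcases hf : fmB n t c sn with ⟨r1, sn1⟩
          rw [hf] at hcall
          cases r1 with
          | some v =>
            have e1 : fmA n t c = some v := hcall.1.symm
            refine ⟨by rw [pvScan, e1], fun x hx => ?_,
              fun hn => absurd (show (some v : Option Int) = none from hn) (by simp)⟩
            replace hx : x ∈ sn1 := hx
            rcases hcall.2.1 x hx with h | h
            · exact Or.inl h
            · exact Or.inr (by omega)
          | none =>
            have e1 : fmA n t c = none := hcall.1.symm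
            have hin1 : ∀ x ∈ sn1, x.length + 1 ≤ n → fmA (x.length + 1) t x = none := by
              intro x hx hlx
              rcases hcall.2.1 x hx with h | h
              · exact hin x h hlx
              · exact hcall.2.2 rfl x hx (by omega)
            have hnext := IHc (fun c' hc' => hlens c' (List.mem_cons_of_mem _ hc')) sn1 hin1
            refine ⟨?_, fun x hx => ?_, hnext.2.2⟩
            · rw [pvScan, e1]
              exact hnext.1
            · rcases hnext.2.1 x hx with h | h
              · rcases hcall.2.1 x h with h2 | h2
                · exact Or.inl h2
                · exact Or.inr (by omega)
              · exact Or.inr h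
      have hsn : ∀ x ∈ PySem.Set.add seen s,
          x.length + 1 ≤ n → fmA (x.length + 1) t x = none := by
        intro x hx hlx
        rw [PySem.Set.mem_add] at hx
        rcases hx with h | h
        · exact hinv x h (by omega)
        · subst h; exact absurd hlx (by omega)
      have h0 := hrec (pvCands s) (fun c hc => pvCands_mem_length hc ▸ (by
          have := pvCands_mem_length hc; omega)) (PySem.Set.add seen s) hsn
      have h1 : (fmBRec (fmB n t) (pvCands s) (PySem.Set.add seen s)).1 = fmA (n+1) t s := by
        rw [h0.1, hscan, hAeq]
      refine ⟨h1, fun x hx => ?_, fun hn x hx hlx => ?_⟩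
      · rcases h0.2.1 x hx with h | h
        · rw [PySem.Set.mem_add] at h
          rcases h with h2 | h2
          · exact Or.inl h2
          · subst h2; exact Or.inr (by omega)
        · exact Or.inr (by omega)
      · by_cases hx1 : x.length + 1 ≤ n
        · exact h0.2.2 hn x hx hx1
        · rcases h0.2.1 x hx with h | h
          · rw [PySem.Set.mem_add] at h
            rcases h with h2 | h2
            · exact hinv x h2 hlx
            · subst h2
              rw [hlen, hAeq, ← hscan, ← h0.1]
              exact hn
          · exact absurd h hx1

-- ===== VERDICT (by name: the statement is the Claim_ definition above) =====
theorem fuzzy_match_kp_spec : Claim_equal_fuzzy_match_kp := by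
  intro kp text _
  unfold Spec_fuzzy_match_kp fuzzy_match_kp fuzzy_match_kp_alt
  have h := fmB_sound text.toList kp.toList.length kp.toList PySem.Set.empty rfl
    (by intro x hx; simp [PySem.Set.empty] at hx)
  exact h.1.symm
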